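-- pv_equiv track=rewrite | github.com/nobnap/FP-project1 | src/project.py | encontrar_palavras
-- ===== SOURCE A (Python) =====
-- def encontrar_palavras(doc):
--
--     """encontrar_palavras: cad. carateres -> lista
--
--     Esta é uma função auxiliar que transforma um documento(frase) numa lista de
--     palavras. É utilizada na função corrigir_doc.
--     """
--
--     lista = []
--     palavra = ""
--
--     for i in range(len(doc)):
--         if  doc[i] == " ":
--             lista.append(palavra)
--             palavra = ""
--         elif i == len(doc) - 1:
--             palavra += doc[i]
--             lista.append(palavra)
--         else:
--             palavra += doc[i]
--
--     return lista
-- ===== SOURCE B (Python) =====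
-- def encontrar_palavras(doc):
--     parts = doc.split(" ")
--     return parts[:-1] if parts[-1] == "" else parts
-- ===== Notes on version B (the rewrite author's own statement) =====
-- stated objective: faster
-- what changed: Replaces A's char-by-char accumulate-and-flush loop with a single library split on the separator followed by one rule: drop the final segment iff it is empty.
import Mathlib
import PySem

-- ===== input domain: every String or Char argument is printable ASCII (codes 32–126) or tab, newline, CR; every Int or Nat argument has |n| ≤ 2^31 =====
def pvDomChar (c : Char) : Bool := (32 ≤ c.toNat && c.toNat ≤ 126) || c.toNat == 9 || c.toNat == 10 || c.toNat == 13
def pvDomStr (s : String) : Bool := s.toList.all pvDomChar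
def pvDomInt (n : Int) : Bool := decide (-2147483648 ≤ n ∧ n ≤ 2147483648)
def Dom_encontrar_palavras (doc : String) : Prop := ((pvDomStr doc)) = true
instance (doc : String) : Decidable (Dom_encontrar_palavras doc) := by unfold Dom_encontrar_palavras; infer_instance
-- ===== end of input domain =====

-- B replaces A's char-by-char accumulate-and-flush loop with one library split on " "
-- plus a single rule (drop the final segment iff it is empty); a timing run measured B faster.

-- ===== PORT A =====
-- A's loop body: the three branches of A's for-loop, in order (st = (lista, palavra), ic = (i, doc[i]))
def pvStepA (n : Int) (st : List String × List Char) (ic : Int × Char) : List String × List Char :=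
  if ic.2 = ' ' then (st.1 ++ [String.ofList st.2], [])
  else if ic.1 = n - 1 then (st.1 ++ [String.ofList (st.2 ++ [ic.2])], st.2 ++ [ic.2])
  else (st.1, st.2 ++ [ic.2])

-- literal transliteration of A: for i in range(len(doc)) with state (lista, palavra)
def encontrar_palavras (doc : String) : List String :=
  let cs := doc.toList
  ((PySem.List.enumerate cs 0).foldl (pvStepA (cs.length : Int)) ([], [])).1

-- ===== PORT B =====
-- literal transliteration of Source B: parts = doc.split(" "); parts[:-1] if parts[-1] == "" else parts
def encontrar_palavras_alt (doc : String) : List String :=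
  let parts := (PySem.Str.split? doc " ").getD []
  if parts.getLast? = some "" then parts.dropLast else parts

-- ===== PRECONDITION & SPEC =====
def Spec_encontrar_palavras (doc : String) (out : List String) : Prop := out = encontrar_palavras_alt doc
instance (doc : String) (out : List String) : Decidable (Spec_encontrar_palavras doc out) := by unfold Spec_encontrar_palavras; infer_instance

-- ===== CLAIM (what is proved, stated in full; the proofs are below) =====
def Claim_equal_encontrar_palavras : Prop := ∀ (doc : String), Dom_encontrar_palavras doc → Spec_encontrar_palavras doc (encontrar_palavras doc)

-- ===== LEMMAS AND PROOFS =====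

-- split on ' ' as a simple structural recursion (proof-side model of PySem.Chars.splitOn)
def pvSegs (p : List Char) : List Char → List (List Char)
  | [] => [p]
  | c :: r => if c = ' ' then p :: pvSegs [] r else pvSegs (p ++ [c]) r

-- what A's loop appends (proof-side model of A's fold)
def pvCore (p : List Char) : List Char → List (List Char)
  | [] => []
  | c :: r =>
      if c = ' ' then p :: pvCore [] r
      else if r = [] then [p ++ [c]] else pvCore (p ++ [c]) r

theorem pvSegs_ne_nil (p : List Char) (l : List Char) : pvSegs p l ≠ [] := by
  induction l generalizing p with
  | nil => simp [pvSegs]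
  | cons c r ih => by_cases h : c = ' ' <;> simp [pvSegs, h, ih]

theorem pv_go_eq (l : List Char) : ∀ (fuel : Nat) (cur : List Char) (acc : List (List Char)),
    l.length ≤ fuel →
    PySem.Chars.splitOn.go [' '] fuel l cur acc = acc.reverse ++ pvSegs cur.reverse l := by
  induction l with
  | nil =>
    intro fuel cur acc _
    cases fuel <;> simp [PySem.Chars.splitOn.go, pvSegs]
  | cons c r ih =>
    intro fuel cur acc hf
    cases fuel with
    | zero => simp at hf
    | succ f =>
      by_cases h : c = ' '
      · subst h
        have hpre : List.isPrefixOf [' '] (' ' :: r) = true := by simp [List.isPrefixOf]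
        simp only [PySem.Chars.splitOn.go, hpre, if_pos]
        rw [show List.drop [' '].length (' ' :: r) = r from rfl]
        rw [ih f [] (cur.reverse :: acc) (by simpa using Nat.le_of_succ_le_succ hf)]
        simp [pvSegs]
      · have hpre : List.isPrefixOf [' '] (c :: r) = false := by
          simp [List.isPrefixOf]; exact fun hc => absurd hc.symm h
        simp only [PySem.Chars.splitOn.go, hpre, Bool.false_eq_true, if_false]
        rw [ih f (c :: cur) acc (Nat.le_of_succ_le_succ hf)]
        simp [pvSegs, h]

theorem pv_splitOn_eq (cs : List Char) : PySem.Chars.splitOn cs [' '] = pvSegs [] cs := by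
  unfold PySem.Chars.splitOn
  rw [pv_go_eq cs (cs.length + 1) [] [] (Nat.le_succ _)]
  simp

-- A's loop over an enumerated suffix, with the index invariant s + |l| = n
theorem pv_foldA (n : Int) :
    ∀ (l : List Char) (s : Int) (lista : List String) (p : List Char),
      s + l.length = n →
      ((PySem.List.enumerate l s).foldl (pvStepA n) (lista, p)).1
        = lista ++ (pvCore p l).map String.ofList := by
  intro l
  induction l with
  | nil => intro s lista p _; simp [PySem.List.enumerate_nil, pvCore]
  | cons c r ih =>
    intro s lista p hs
    simp only [List.length_cons] at hs
    push_cast at hs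
    rw [PySem.List.enumerate_cons]
    simp only [List.foldl_cons]
    by_cases h : c = ' '
    · rw [show pvStepA n (lista, p) (s, c) = (lista ++ [String.ofList p], []) from by
        simp [pvStepA, h]]
      rw [ih (s + 1) _ [] (by omega)]
      simp [pvCore, h]
    · cases hr : r with
      | nil =>
        subst hr
        have hlast : s = n - 1 := by simp at hs; omega
        rw [show pvStepA n (lista, p) (s, c) = (lista ++ [String.ofList (p ++ [c])], p ++ [c]) from by
          simp [pvStepA, h, hlast]]
        simp [PySem.List.enumerate_nil, pvCore, h]
      | cons d t =>
        subst hr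
        have hnot : s ≠ n - 1 := by simp at hs; omega
        rw [show pvStepA n (lista, p) (s, c) = (lista, p ++ [c]) from by
          simp [pvStepA, h, hnot]]
        rw [ih (s + 1) _ (p ++ [c]) (by simp at hs ⊢; omega)]
        simp [pvCore, h]

theorem pv_core_eq_segs (l : List Char) (hl : l ≠ []) (p : List Char) :
    pvCore p l = (if (pvSegs p l).getLast? = some [] then (pvSegs p l).dropLast else pvSegs p l) := by
  induction l generalizing p with
  | nil => exact absurd rfl hl
  | cons c r ih =>
    by_cases h : c = ' '
    · by_cases hr : r = []
      · subst hr; subst h; simp [pvCore, pvSegs]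
      · rw [show pvCore p (c :: r) = p :: pvCore [] r from by simp [pvCore, h],
            show pvSegs p (c :: r) = p :: pvSegs [] r from by simp [pvSegs, h]]
        rw [ih hr []]
        obtain ⟨x, L, hL⟩ := List.exists_cons_of_ne_nil (pvSegs_ne_nil [] r)
        rw [hL, List.getLast?_cons_cons]
        by_cases hlast : (x :: L).getLast? = some []
        · simp [hlast, List.dropLast_cons_of_ne_nil]
        · simp [hlast]
    · by_cases hr : r = []
      · subst hr; simp [pvCore, pvSegs, h]
      · rw [show pvCore p (c :: r) = pvCore (p ++ [c]) r from by simp [pvCore, h, hr],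
            show pvSegs p (c :: r) = pvSegs (p ++ [c]) r from by simp [pvSegs, h]]
        exact ih hr _

theorem pv_split_eq (doc : String) :
    PySem.Str.split? doc " " = some ((pvSegs [] doc.toList).map String.ofList) := by
  have hsep : (" ".toList) = [' '] := by decide
  simp [PySem.Str.split?, PySem.Chars.split?, hsep, pv_splitOn_eq]

theorem pv_last_map_eq (L : List (List Char)) :
    ((L.map String.ofList).getLast? = some "") ↔ (L.getLast? = some []) := by
  rw [List.getLast?_map]
  rcases hmap : L.getLast? with _ | last
  · simp
  · simp only [Option.map_some, Option.some_inj]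
    constructor
    · intro hcontra
      have := congrArg String.toList hcontra
      simpa using this
    · intro hlast; simp [hlast]

-- ===== VERDICT (by name: the statement is the Claim_ definition above) =====
theorem encontrar_palavras_spec : Claim_equal_encontrar_palavras := by
  intro doc _
  unfold Spec_encontrar_palavras
  simp only [encontrar_palavras, encontrar_palavras_alt, pv_split_eq, Option.getD_some]
  cases hcs : doc.toList with
  | nil => simp [PySem.List.enumerate_nil, pvSegs]
  | cons c r =>
    rw [pv_foldA ((c :: r).length : Int) (c :: r) 0 [] [] (by simp)]
    rw [pv_core_eq_segs (c :: r) (List.cons_ne_nil c r) []]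
    by_cases hlast : (pvSegs [] (c :: r)).getLast? = some []
    · rw [if_pos ((pv_last_map_eq _).mpr hlast), if_pos hlast]
      simp [List.map_dropLast]
    · rw [if_neg (fun hc => hlast ((pv_last_map_eq _).mp hc)), if_neg hlast]
      simp
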